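-- pv_equiv track=rewrite | github.com/Sahil9976/oats-chatbot | app.py | _is_history_inquiry
-- ===== SOURCE A (Python) =====
-- def _is_history_inquiry(user_query: str) -> bool:
--     """Check if the user is asking about chat history or previous questions."""
--     query_lower = user_query.lower().strip()
--
--     history_phrases = [
--         'what did i ask', 'what have i asked', 'what was my last question',
--         'previous question', 'previous questions', 'chat history', 'conversation history',
--         'what did we discuss', 'what we talked about', 'our conversation',
--         'my last query', 'earlier question', 'before i asked', 'previously asked',
--         'show my questions', 'show chat', 'show conversation', 'show history',
--         'remind me what', 'what questions did i', 'my previous', 'our previous'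
--     ]
--
--     return any(phrase in query_lower for phrase in history_phrases)
-- ===== SOURCE B (Python) =====
-- _PHRASES = (
--     "what did i ask", "what have i asked", "what was my last question",
--     "previous question", "previous questions", "chat history",
--     "conversation history", "what did we discuss", "what we talked about",
--     "our conversation", "my last query", "earlier question",
--     "before i asked", "previously asked", "show my questions", "show chat",
--     "show conversation", "show history", "remind me what",
--     "what questions did i", "my previous", "our previous",
-- )
--
-- # Bucket the phrases by their first character, computed once at import time.
-- _BUCKETS = {}
-- for _p in _PHRASES:
--     _BUCKETS.setdefault(_p[0], []).append(_p)
--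
--
-- def _is_history_inquiry(user_query: str) -> bool:
--     """Check if the user is asking about chat history or previous questions."""
--     q = user_query.lower().strip()
--     # Walk the query once: at each position only the phrases in the bucket of
--     # the current character can match, and they are tested with startswith.
--     for i, c in enumerate(q):
--         for p in _BUCKETS.get(c, ()):
--             if q.startswith(p, i):
--                 return True
--     return False
-- ===== Notes on version B (the rewrite author's own statement) =====
-- stated objective: alternative
-- what changed: Builds a dict bucketing the phrases by first character once, then walks the lowered query a single time testing only the current character's bucket with startswith, instead of a per-phrase substring-containment scan.
import Mathlib
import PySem

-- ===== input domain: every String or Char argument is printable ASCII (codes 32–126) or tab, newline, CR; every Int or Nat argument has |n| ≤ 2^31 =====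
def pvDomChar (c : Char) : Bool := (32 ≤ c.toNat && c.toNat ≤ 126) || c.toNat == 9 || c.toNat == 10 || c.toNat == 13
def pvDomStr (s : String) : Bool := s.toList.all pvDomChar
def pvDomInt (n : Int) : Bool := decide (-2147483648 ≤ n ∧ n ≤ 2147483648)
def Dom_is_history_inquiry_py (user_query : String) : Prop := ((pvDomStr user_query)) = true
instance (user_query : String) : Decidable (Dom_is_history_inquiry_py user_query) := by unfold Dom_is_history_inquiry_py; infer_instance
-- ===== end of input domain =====

-- B replaces A's per-phrase substring-containment loop by a first-character bucket index
-- built once from the phrase list, plus a single left-to-right walk of the query that only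
-- tests the bucket of the current character with startswith (objective: alternative).

-- ===== PORT A =====
def pvPhrasesA : List String :=
  ["what did i ask", "what have i asked", "what was my last question",
   "previous question", "previous questions", "chat history", "conversation history",
   "what did we discuss", "what we talked about", "our conversation",
   "my last query", "earlier question", "before i asked", "previously asked",
   "show my questions", "show chat", "show conversation", "show history",
   "remind me what", "what questions did i", "my previous", "our previous"]

def is_history_inquiry_py (user_query : String) : Bool :=
  let query_lower := PySem.Str.strip (PySem.Str.lower user_query)
  pvPhrasesA.any (fun phrase => PySem.Str.isIn phrase query_lower)

-- ===== PORT B =====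
def pvPhrasesB : List String :=
  ["what did i ask", "what have i asked", "what was my last question",
   "previous question", "previous questions", "chat history", "conversation history",
   "what did we discuss", "what we talked about", "our conversation",
   "my last query", "earlier question", "before i asked", "previously asked",
   "show my questions", "show chat", "show conversation", "show history",
   "remind me what", "what questions did i", "my previous", "our previous"]

-- the (p[0], p) pairs; every phrase is nonempty, so p[0] is p.toList.headD _ here
def pvKeyed : List (Char × String) := pvPhrasesB.map (fun p => (p.toList.headD ' ', p))

-- buckets.setdefault(c0, []).append(p)  ≡  modify c0 [] (· ++ [p])
def pvBuckets : PySem.Dict Char (List String) :=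
  pvKeyed.foldl (fun d q => d.modify q.1 [] (· ++ [q.2])) PySem.Dict.empty

-- the for-loop over enumerate(q): at each suffix c :: rest test only bucket c
def pvScan : List Char → Bool
  | [] => false
  | c :: rest =>
      (pvBuckets.getD c []).any (fun p => PySem.Chars.startswith (c :: rest) p.toList)
      || pvScan rest

def is_history_inquiry_py_alt (user_query : String) : Bool :=
  pvScan (PySem.Str.strip (PySem.Str.lower user_query)).toList

-- ===== PRECONDITION & SPEC =====
def Spec_is_history_inquiry_py (user_query : String) (out : Bool) : Prop := out = is_history_inquiry_py_alt user_query
instance (user_query : String) (out : Bool) : Decidable (Spec_is_history_inquiry_py user_query out) := by unfold Spec_is_history_inquiry_py; infer_instance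

-- ===== CLAIM (what is proved, stated in full; the proofs are below) =====
def Claim_equal_is_history_inquiry_py : Prop := ∀ (user_query : String), Dom_is_history_inquiry_py user_query → Spec_is_history_inquiry_py user_query (is_history_inquiry_py user_query)

-- ===== LEMMAS AND PROOFS =====

theorem pv_phrases_nonempty : ∀ p ∈ pvPhrasesB, p.toList ≠ [] := by decide

-- the bucket of c holds exactly the phrases whose first character is c
theorem pv_bucket_eq (c : Char) :
    pvBuckets.getD c [] = pvPhrasesB.filter (fun p => p.toList.headD ' ' == c) := by
  unfold pvBuckets pvKeyed
  rw [PySem.Dict.getD_foldl_modify_append]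
  simp [List.filter_map, Function.comp_def]

-- B's scan finds a phrase iff some phrase is a prefix of some suffix
theorem pv_scan_iff (l : List Char) :
    pvScan l = true ↔ ∃ p ∈ pvPhrasesB, ∃ i, p.toList <+: l.drop i := by
  induction l with
  | nil =>
      simp only [pvScan, Bool.false_eq_true, false_iff]
      rintro ⟨p, hp, i, hpre⟩
      exact pv_phrases_nonempty p hp (List.prefix_nil.mp (by simpa using hpre))
  | cons c rest ih =>
      simp only [pvScan, Bool.or_eq_true, ih, List.any_eq_true, pv_bucket_eq,
        List.mem_filter, beq_iff_eq, PySem.Chars.startswith_iff]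
      constructor
      · rintro (⟨p, ⟨hp, _⟩, hpre⟩ | ⟨p, hp, i, hpre⟩)
        · exact ⟨p, hp, 0, by simpa using hpre⟩
        · exact ⟨p, hp, i + 1, by simpa using hpre⟩
      · rintro ⟨p, hp, i, hpre⟩
        cases i with
        | zero =>
            left
            refine ⟨p, ⟨hp, ?_⟩, by simpa using hpre⟩
            obtain ⟨t, ht⟩ := hpre
            cases hc : p.toList with
            | nil => exact absurd hc (pv_phrases_nonempty p hp)
            | cons a as =>
                rw [hc] at ht
                simp at ht
                simp [ht.1]
        | succ j => exact Or.inr ⟨p, hp, j, by simpa using hpre⟩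

-- ===== VERDICT (by name: the statement is the Claim_ definition above) =====
theorem is_history_inquiry_py_spec : Claim_equal_is_history_inquiry_py := by
  intro u _
  unfold Spec_is_history_inquiry_py is_history_inquiry_py is_history_inquiry_py_alt
  rw [Bool.eq_iff_iff]
  simp only [List.any_eq_true, PySem.Str.isIn_eq, pv_scan_iff]
  constructor
  · rintro ⟨p, hp, hin⟩
    obtain ⟨j, hj⟩ := (PySem.Chars.exists_prefix_drop_iff_isIn p.toList _).mpr hin
    exact ⟨p, hp, j, hj⟩
  · rintro ⟨p, hp, i, hpre⟩
    exact ⟨p, hp, (PySem.Chars.exists_prefix_drop_iff_isIn p.toList _).mp ⟨i, hpre⟩⟩
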